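-- pv_equiv track=rewrite | github.com/skstgu8080/formai | selenium_automation.py | detect_field_type
-- ===== SOURCE A (Python) =====
-- from typing import Dict, List, Optional, Any
--
-- def detect_field_type(element_info: Dict) -> Optional[str]:
--     """Detect the type of form field based on attributes"""
--     # Check input type
--     input_type = element_info.get('type', '').lower()
--     name = element_info.get('name', '').lower()
--     id_attr = element_info.get('id', '').lower()
--     placeholder = element_info.get('placeholder', '').lower()
--
--     # Combined attributes for detection
--     combined = f"{name} {id_attr} {placeholder} {input_type}"
--
--     # Detection rules
--     if 'email' in combined or input_type == 'email':
--         return 'email'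
--     elif any(x in combined for x in ['firstname', 'first_name', 'fname']):
--         return 'first_name'
--     elif any(x in combined for x in ['lastname', 'last_name', 'lname']):
--         return 'last_name'
--     elif any(x in combined for x in ['phone', 'tel', 'mobile']):
--         return 'phone'
--     elif any(x in combined for x in ['address', 'street', 'addr']):
--         return 'address'
--     elif 'city' in combined:
--         return 'city'
--     elif 'state' in combined or 'province' in combined:
--         return 'state'
--     elif any(x in combined for x in ['zip', 'postal', 'postcode']):
--         return 'zip'
--     elif 'password' in combined or input_type == 'password':
--         return 'password'
--     elif 'date' in combined or input_type == 'date':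
--         return 'date_of_birth'
--
--     return None
-- ===== SOURCE B (Python) =====
-- _KEYWORDS = [
--     ('email', 0),
--     ('firstname', 1), ('first_name', 1), ('fname', 1),
--     ('lastname', 2), ('last_name', 2), ('lname', 2),
--     ('phone', 3), ('tel', 3), ('mobile', 3),
--     ('address', 4), ('street', 4), ('addr', 4),
--     ('city', 5),
--     ('state', 6), ('province', 6),
--     ('zip', 7), ('postal', 7), ('postcode', 7),
--     ('password', 8),
--     ('date', 9),
-- ]
-- _LABELS = ['email', 'first_name', 'last_name', 'phone', 'address', 'city',
--            'state', 'zip', 'password', 'date_of_birth']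
--
--
-- def detect_field_type(element_info):
--     """Detect the form-field type by a single left-to-right scan of the text.
--
--     Instead of testing rule after rule (each rule scanning the whole text),
--     walk the combined attribute text once; at every position try each keyword
--     as a prefix of the remaining text and keep the lowest rule number seen.
--     Correct because a keyword occurs as a substring iff it is a prefix of some
--     position's suffix, and rule numbers encode the cascade's priority order.
--     """
--     combined = ' '.join(
--         element_info.get(k, '') for k in ('name', 'id', 'placeholder', 'type')
--     ).lower()
--     best = len(_LABELS)
--     for i in range(len(combined)):
--         for kw, pri in _KEYWORDS:
--             if pri < best and combined.startswith(kw, i):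
--                 best = pri
--     return _LABELS[best] if best < len(_LABELS) else None
-- ===== Notes on version B (the rewrite author's own statement) =====
-- stated objective: alternative
-- what changed: Replaces the rule-major if/elif cascade (each rule re-scanning the whole combined string) with a text-major single left-to-right scan: at each position every keyword is tried as a prefix of the remaining text and the minimum rule number seen is kept, mapped to its label at the end; the redundant input_type == 'email'/'password'/'date' disjuncts are dropped (subsumed because combined ends with input_type).
import Mathlib
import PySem

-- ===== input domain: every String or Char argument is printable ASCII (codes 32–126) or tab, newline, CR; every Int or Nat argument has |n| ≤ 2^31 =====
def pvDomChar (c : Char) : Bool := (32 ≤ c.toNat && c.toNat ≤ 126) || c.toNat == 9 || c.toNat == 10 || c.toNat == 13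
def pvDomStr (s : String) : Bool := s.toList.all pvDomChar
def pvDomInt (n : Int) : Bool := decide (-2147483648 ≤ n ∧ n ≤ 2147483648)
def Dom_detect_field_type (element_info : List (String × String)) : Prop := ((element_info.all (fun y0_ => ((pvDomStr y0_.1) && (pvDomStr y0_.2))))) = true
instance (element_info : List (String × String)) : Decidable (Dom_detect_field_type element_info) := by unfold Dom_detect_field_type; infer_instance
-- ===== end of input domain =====

-- ===== PORT A =====
-- B replaces the rule-major if/elif cascade by a text-major single scan keeping the minimum rule number (alternative algorithm; return value proved equal).
-- dict.get(k, '') on the association-list dict: first match, else default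
def pvGetAttr (d : List (String × String)) (k : String) : String :=
  PySem.Dict.getD (PySem.Dict.mk d) k ""

def detect_field_type (element_info : List (String × String)) : Option String :=
  let input_type := PySem.Chars.lower (pvGetAttr element_info "type").toList
  let name := PySem.Chars.lower (pvGetAttr element_info "name").toList
  let id_attr := PySem.Chars.lower (pvGetAttr element_info "id").toList
  let placeholder := PySem.Chars.lower (pvGetAttr element_info "placeholder").toList
  let combined := name ++ " ".toList ++ id_attr ++ " ".toList ++ placeholder ++ " ".toList ++ input_type
  if PySem.Chars.isIn "email".toList combined || input_type == "email".toList then some "email"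
  else if ["firstname".toList, "first_name".toList, "fname".toList].any (fun x => PySem.Chars.isIn x combined) then some "first_name"
  else if ["lastname".toList, "last_name".toList, "lname".toList].any (fun x => PySem.Chars.isIn x combined) then some "last_name"
  else if ["phone".toList, "tel".toList, "mobile".toList].any (fun x => PySem.Chars.isIn x combined) then some "phone"
  else if ["address".toList, "street".toList, "addr".toList].any (fun x => PySem.Chars.isIn x combined) then some "address"
  else if PySem.Chars.isIn "city".toList combined then some "city"
  else if PySem.Chars.isIn "state".toList combined || PySem.Chars.isIn "province".toList combined then some "state"
  else if ["zip".toList, "postal".toList, "postcode".toList].any (fun x => PySem.Chars.isIn x combined) then some "zip"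
  else if PySem.Chars.isIn "password".toList combined || input_type == "password".toList then some "password"
  else if PySem.Chars.isIn "date".toList combined || input_type == "date".toList then some "date_of_birth"
  else none

-- ===== PORT B =====
-- (keyword, rule number) pairs, rule numbers non-decreasing = cascade priority order
def pvKeywords : List (List Char × Nat) :=
  [ ("email".toList, 0),
    ("firstname".toList, 1), ("first_name".toList, 1), ("fname".toList, 1),
    ("lastname".toList, 2), ("last_name".toList, 2), ("lname".toList, 2),
    ("phone".toList, 3), ("tel".toList, 3), ("mobile".toList, 3),
    ("address".toList, 4), ("street".toList, 4), ("addr".toList, 4),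
    ("city".toList, 5),
    ("state".toList, 6), ("province".toList, 6),
    ("zip".toList, 7), ("postal".toList, 7), ("postcode".toList, 7),
    ("password".toList, 8),
    ("date".toList, 9) ]

def pvLabels : List String :=
  ["email", "first_name", "last_name", "phone", "address", "city",
   "state", "zip", "password", "date_of_birth"]

-- inner loop: try every keyword as a prefix of the remaining text s, keep the lowest rule number
def pvInner (kws : List (List Char × Nat)) (s : List Char) (best : Nat) : Nat :=
  kws.foldl (fun b kp => if kp.2 < b && PySem.Chars.startswith s kp.1 then kp.2 else b) best

-- outer loop: one left-to-right pass over the text (i-th step sees the i-th suffix)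
def pvScanPos (kws : List (List Char × Nat)) : List Char → Nat → Nat
  | [], best => best
  | c :: rest, best => pvScanPos kws rest (pvInner kws (c :: rest) best)

def detect_field_type_alt (element_info : List (String × String)) : Option String :=
  let combined := PySem.Chars.lower (PySem.Chars.join " ".toList
    (["name", "id", "placeholder", "type"].map (fun k => (pvGetAttr element_info k).toList)))
  let best := pvScanPos pvKeywords combined 10
  if best < 10 then some (pvLabels.getD best "") else none

-- ===== PRECONDITION & SPEC =====
def Spec_detect_field_type (element_info : List (String × String)) (out : Option String) : Prop := out = detect_field_type_alt element_info
instance (element_info : List (String × String)) (out : Option String) : Decidable (Spec_detect_field_type element_info out) := by unfold Spec_detect_field_type; infer_instance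

-- ===== CLAIM (what is proved, stated in full; the proofs are below) =====
def Claim_equal_detect_field_type : Prop := ∀ (element_info : List (String × String)), Dom_detect_field_type element_info → Spec_detect_field_type element_info (detect_field_type element_info)

-- ===== LEMMAS AND PROOFS =====

-- an order-friendly reformulation of the min-keeping update
def pvFold (kws : List (List Char × Nat)) (P : List Char × Nat → Bool) (best : Nat) : Nat :=
  kws.foldl (fun b kp => if P kp then min b kp.2 else b) best

theorem pvInner_eq (kws : List (List Char × Nat)) (s : List Char) (best : Nat) :
    pvInner kws s best = pvFold kws (fun kp => PySem.Chars.startswith s kp.1) best := by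
  unfold pvInner pvFold
  congr 1
  funext b kp
  cases h : PySem.Chars.startswith s kp.1
  · simp [h]
  · simp only [h, Bool.and_true]
    rw [Nat.min_def]
    split_ifs <;> simp only [decide_eq_true_eq] at * <;> omega

theorem pvFold_min (kws : List (List Char × Nat)) (P : List Char × Nat → Bool) (b x : Nat) :
    pvFold kws P (min b x) = min (pvFold kws P b) x := by
  induction kws generalizing b with
  | nil => rfl
  | cons kp t ih =>
    simp only [pvFold, List.foldl_cons] at *
    cases h : P kp
    · simp only [Bool.false_eq_true, if_false, ih]
    · simp only [if_true]
      rw [show min (min b x) kp.2 = min (min b kp.2) x by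
            rw [Nat.min_assoc, Nat.min_assoc, Nat.min_comm x]]
      exact ih (min b kp.2)

theorem pvFold_or (kws : List (List Char × Nat)) (P Q : List Char × Nat → Bool) (best : Nat) :
    pvFold kws Q (pvFold kws P best) = pvFold kws (fun kp => P kp || Q kp) best := by
  induction kws generalizing best with
  | nil => rfl
  | cons kp t ih =>
    simp only [pvFold, List.foldl_cons] at *
    rw [← ih]
    have key : (if Q kp = true then min (pvFold t P (if P kp = true then min best kp.2 else best)) kp.2
                else pvFold t P (if P kp = true then min best kp.2 else best))
        = pvFold t P (if (P kp || Q kp) = true then min best kp.2 else best) := by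
      cases hP : P kp <;> cases hQ : Q kp <;>
        simp only [Bool.false_or, Bool.or_false, Bool.or_self, if_true,
          Bool.false_eq_true, if_false]
      · exact (pvFold_min t P best kp.2).symm
      · rw [pvFold_min t P best kp.2, Nat.min_assoc, Nat.min_self]
    calc List.foldl (fun b kp => if Q kp = true then min b kp.2 else b)
            (if Q kp = true then min (pvFold t P (if P kp = true then min best kp.2 else best)) kp.2
             else pvFold t P (if P kp = true then min best kp.2 else best)) t
        = List.foldl (fun b kp => if Q kp = true then min b kp.2 else b)
            (pvFold t P (if (P kp || Q kp) = true then min best kp.2 else best)) t := by rw [key]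

theorem pvFold_none (kws : List (List Char × Nat)) (P : List Char × Nat → Bool) (best : Nat)
    (h : ∀ kp ∈ kws, P kp = false) : pvFold kws P best = best := by
  induction kws with
  | nil => rfl
  | cons kp t ih =>
    simp only [pvFold, List.foldl_cons, h kp List.mem_cons_self, if_neg Bool.false_ne_true]
    exact ih (fun kp' hm => h kp' (List.mem_cons_of_mem _ hm))

theorem pv_isIn_cons (kw : List Char) (c : Char) (rest : List Char) :
    PySem.Chars.isIn kw (c :: rest)
      = (PySem.Chars.startswith (c :: rest) kw || PySem.Chars.isIn kw rest) := by
  rw [Bool.eq_iff_iff]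
  simp [PySem.Chars.isIn_iff_infix, PySem.Chars.startswith, List.infix_cons_iff,
        List.isPrefixOf_iff_prefix]

theorem pv_scan_eq (kws : List (List Char × Nat)) (hne : ∀ kp ∈ kws, kp.1 ≠ ([] : List Char)) :
    ∀ (s : List Char) (best : Nat),
      pvScanPos kws s best = pvFold kws (fun kp => PySem.Chars.isIn kp.1 s) best := by
  intro s
  induction s with
  | nil =>
    intro best
    rw [pvScanPos, pvFold_none]
    intro kp hm
    rw [PySem.Chars.isIn_eq_false_iff]
    intro hinf
    exact hne kp hm (List.eq_nil_of_infix_nil hinf)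
  | cons c rest ih =>
    intro best
    rw [pvScanPos, ih, pvInner_eq, pvFold_or]
    congr 1
    funext kp
    exact (pv_isIn_cons kp.1 c rest).symm

theorem pvFold_ge (kws : List (List Char × Nat)) (P : List Char × Nat → Bool) (x : Nat)
    (h : ∀ kp ∈ kws, x ≤ kp.2) : pvFold kws P x = x := by
  induction kws with
  | nil => rfl
  | cons kp t ih =>
    simp only [pvFold, List.foldl_cons, Nat.min_eq_left (h kp List.mem_cons_self), ite_self]
    exact ih (fun kp' hm => h kp' (List.mem_cons_of_mem _ hm))

-- with rule numbers non-decreasing and all below `big`, the kept minimum is the first match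
theorem pvFold_find (kws : List (List Char × Nat)) (P : List Char × Nat → Bool) (big : Nat)
    (hb : ∀ kp ∈ kws, kp.2 < big) (hs : kws.Pairwise (fun a b => a.2 ≤ b.2)) :
    pvFold kws P big = (((kws.find? P).map Prod.snd).getD big) := by
  induction kws with
  | nil => rfl
  | cons kp t ih =>
    rcases List.pairwise_cons.mp hs with ⟨hhd, htl⟩
    cases h : P kp
    · have hstep : pvFold (kp :: t) P big = pvFold t P big := by simp [pvFold, h]
      rw [hstep, List.find?_cons_of_neg (by simp [h])]
      exact ih (fun kp' hm => hb kp' (List.mem_cons_of_mem _ hm)) htl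
    · have hstep : pvFold (kp :: t) P big = pvFold t P kp.2 := by
        simp [pvFold, h, Nat.min_eq_right (Nat.le_of_lt (hb kp List.mem_cons_self))]
      rw [hstep, List.find?_cons_of_pos (by simp [h]),
        Option.map_some, Option.getD_some]
      exact pvFold_ge t P kp.2 hhd

-- input_type == x implies 'x in combined' when combined ends with input_type
theorem pv_disj_absorb (x c t : List Char) (h : t <:+ c) :
    (PySem.Chars.isIn x c || (t == x)) = PySem.Chars.isIn x c := by
  cases hb : t == x
  · simp
  · have ht : t = x := by simpa using hb
    subst ht
    have hi : PySem.Chars.isIn t c = true := (PySem.Chars.isIn_iff_infix _ _).2 h.isInfix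
    simp [hi]

theorem pv_lowerChar_space : PySem.Chars.lowerChar ' ' = ' ' := by decide

theorem pv_space_toList : " ".toList = [' '] := rfl

-- bridge: cascade over grouped conditions = label lookup of the first matching table entry
theorem pv_main (b1 b2 b3 b4 b5 b6 b7 b8 b9 b10 b11 b12 b13 b14 b15 b16 b17 b18 b19 b20 b21 : Bool) :
    ((if b1 then some "email" else (if b2 || (b3 || b4) then some "first_name" else (if b5 || (b6 || b7) then some "last_name" else (if b8 || (b9 || b10) then some "phone" else (if b11 || (b12 || b13) then some "address" else (if b14 then some "city" else (if b15 || b16 then some "state" else (if b17 || (b18 || b19) then some "zip" else (if b20 then some "password" else (if b21 then some "date_of_birth" else none)))))))))) : Option String) = (if ((Option.map Prod.snd (cond b1 (some ("email".toList, 0)) (cond b2 (some ("firstname".toList, 1)) (cond b3 (some ("first_name".toList, 1)) (cond b4 (some ("fname".toList, 1)) (cond b5 (some ("lastname".toList, 2)) (cond b6 (some ("last_name".toList, 2)) (cond b7 (some ("lname".toList, 2)) (cond b8 (some ("phone".toList, 3)) (cond b9 (some ("tel".toList, 3)) (cond b10 (some ("mobile".toList, 3)) (cond b11 (some ("address".toList,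 4)) (cond b12 (some ("street".toList, 4)) (cond b13 (some ("addr".toList, 4)) (cond b14 (some ("city".toList, 5)) (cond b15 (some ("state".toList, 6)) (cond b16 (some ("province".toList, 6)) (cond b17 (some ("zip".toList, 7)) (cond b18 (some ("postal".toList, 7)) (cond b19 (some ("postcode".toList, 7)) (cond b20 (some ("password".toList, 8)) (cond b21 (some ("date".toList, 9)) none)))))))))))))))))))))).getD 10) < 10 then some (pvLabels.getD ((Option.map Prod.snd (cond b1 (some ("email".toList, 0)) (cond b2 (some ("firstname".toList, 1)) (cond b3 (some ("first_name".toList, 1)) (cond b4 (some ("fname".toList, 1)) (cond b5 (some ("lastname".toList, 2)) (cond b6 (some ("last_name".toList, 2)) (cond b7 (some ("lname".toList, 2)) (cond b8 (some ("phone".toList, 3)) (cond b9 (some ("tel".toList, 3)) (cond b10 (some ("mobile".toList, 3)) (cond b11 (some ("address".toList, 4)) (cond b12 (some ("street".toList, 4)) (cond b13 (some ("addr".toList, 4)) (cond b14 (some ("city".toList, 5)) (cond b15 (some ("state".toList, 6)) (cond b16 (some ("province".toList, 6)) (cond b17 (some ("zip".toList, 7)) (cond b18 (some ("postal".toList, 7))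 (cond b19 (some ("postcode".toList, 7)) (cond b20 (some ("password".toList, 8)) (cond b21 (some ("date".toList, 9)) none)))))))))))))))))))))).getD 10) "") else none) := by
  cases b1 with
  | true => rfl
  | false =>
    cases b2 with
    | true => rfl
    | false =>
      cases b3 with
      | true => rfl
      | false =>
        cases b4 with
        | true => rfl
        | false =>
          cases b5 with
          | true => rfl
          | false =>
            cases b6 with
            | true => rfl
            | false =>
              cases b7 with
              | true => rfl
              | false =>
                cases b8 with
                | true => rfl
                | false =>
                  cases b9 with
                  | true => rfl
                  | false =>
                    cases b10 with
                    | true => rfl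
                    | false =>
                      cases b11 with
                      | true => rfl
                      | false =>
                        cases b12 with
                        | true => rfl
                        | false =>
                          cases b13 with
                          | true => rfl
                          | false =>
                            cases b14 with
                            | true => rfl
                            | false =>
                              cases b15 with
                              | true => rfl
                              | false =>
                                cases b16 with
                                | true => rfl
                                | false =>
                                  cases b17 with
                                  | true => rfl
                                  | false =>
                                    cases b18 with
                                    | true => rfl
                                    | false =>
                                      cases b19 with
                                      | true => rfl
                                      | false =>
                                        cases b20 with
                                        | true => rfl
                                        | false =>
                                          cases b21 with
                                          | true => rfl
                                          | false =>
                                            rfl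

-- ===== VERDICT (by name: the statement is the Claim_ definition above) =====
theorem detect_field_type_spec : Claim_equal_detect_field_type := by
  intro e _
  unfold Spec_detect_field_type detect_field_type detect_field_type_alt
  dsimp only
  rw [pv_scan_eq pvKeywords (by decide),
      pvFold_find pvKeywords _ 10 (by decide) (by decide)]
  simp only [pv_space_toList, List.map_cons, List.map_nil, PySem.Chars.join_cons_cons,
    PySem.Chars.join_singleton, PySem.Chars.lower, List.map_append, pv_lowerChar_space,
    List.any_cons, List.any_nil, Bool.or_false, List.append_assoc]
  have hsuf : (List.map PySem.Chars.lowerChar (pvGetAttr e "type").toList) <:+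
      (List.map PySem.Chars.lowerChar (pvGetAttr e "name").toList ++ ([' '] ++
       (List.map PySem.Chars.lowerChar (pvGetAttr e "id").toList ++ ([' '] ++
       (List.map PySem.Chars.lowerChar (pvGetAttr e "placeholder").toList ++ ([' '] ++
        List.map PySem.Chars.lowerChar (pvGetAttr e "type").toList)))))) :=
    ⟨List.map PySem.Chars.lowerChar (pvGetAttr e "name").toList ++ ([' '] ++
       (List.map PySem.Chars.lowerChar (pvGetAttr e "id").toList ++ ([' '] ++
       (List.map PySem.Chars.lowerChar (pvGetAttr e "placeholder").toList ++ [' '])))), by simp⟩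
  rw [pv_disj_absorb _ _ _ hsuf, pv_disj_absorb _ _ _ hsuf, pv_disj_absorb _ _ _ hsuf]
  simp only [pvKeywords, List.find?_cons]
  exact pv_main _ _ _ _ _ _ _ _ _ _ _ _ _ _ _ _ _ _ _ _ _
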